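-- pv_equiv track=rewrite | github.com/koii-network/prometheus-beta | src/list_splitter.py | can_split_list_with_equal_sum
-- ===== SOURCE A (Python) =====
-- def can_split_list_with_equal_sum(nums):
--     """
--     Determine if a list of integers can be split into two sublists with equal sum.
--
--     Args:
--         nums (list): A list of integers to be split.
--
--     Returns:
--         bool: True if the list can be split into two sublists with equal sum, False otherwise.
--
--     Raises:
--         TypeError: If input is not a list.
--         ValueError: If list contains non-integer elements.
--
--     Time Complexity: O(2^n), where n is the length of the list
--     Space Complexity: O(n) due to recursive call stack
--     """
--     # Validate input
--     if not isinstance(nums, list):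
--         raise TypeError("Input must be a list")
--
--     # Handle edge cases
--     if not nums or len(nums) < 2:
--         return False
--
--     # Ensure all elements are integers
--     if not all(isinstance(x, int) for x in nums):
--         raise ValueError("All list elements must be integers")
--
--     # If total sum is odd, it can't be split equally
--     total_sum = sum(nums)
--     if total_sum % 2 != 0:
--         return False
--
--     target_sum = total_sum // 2
--
--     def can_partition(index, current_sum, subset_count):
--         """
--         Recursive helper function to check if target sum can be achieved with restrictions.
--
--         Args:
--             index (int): Current index in the list
--             current_sum (int): Current sum of selected elements
--             subset_count (int): Number of subsets created
--
--         Returns: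
--             bool: True if target sum can be achieved, False otherwise
--         """
--         # Base cases
--         if subset_count > 1:
--             return False
--
--         if current_sum == target_sum and subset_count == 1:
--             return True
--
--         if index >= len(nums):
--             return False
--
--         # Try two choices for each element:
--         # 1. Include the current element in current subset
--         # 2. Start a new subset or skip the current element
--         return (can_partition(index + 1, current_sum + nums[index], subset_count) or
--                 can_partition(index + 1, current_sum, subset_count + 1) or
--                 can_partition(index + 1, current_sum, subset_count))
--
--     return can_partition(0, 0, 0)
-- ===== SOURCE B (Python) =====
-- def can_split_list_with_equal_sum(nums):
--     """Subset-sum via a reachable-sums set: one pass over the list."""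
--     if not isinstance(nums, list):
--         raise TypeError("Input must be a list")
--     if len(nums) < 2:
--         return False
--     if not all(isinstance(x, int) for x in nums):
--         raise ValueError("All list elements must be integers")
--     total = sum(nums)
--     if total % 2 != 0:
--         return False
--     target = total // 2
--     seen = {0}
--     for x in nums:
--         seen |= {s + x for s in seen}
--     return target in seen
-- ===== Notes on version B (the rewrite author's own statement) =====
-- stated objective: alternative
-- what changed: Replaced the exponential three-way recursion (include / bump subset counter / skip) by a single pass that grows a set of reachable subset sums and tests whether total/2 is reachable.
import Mathlib
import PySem

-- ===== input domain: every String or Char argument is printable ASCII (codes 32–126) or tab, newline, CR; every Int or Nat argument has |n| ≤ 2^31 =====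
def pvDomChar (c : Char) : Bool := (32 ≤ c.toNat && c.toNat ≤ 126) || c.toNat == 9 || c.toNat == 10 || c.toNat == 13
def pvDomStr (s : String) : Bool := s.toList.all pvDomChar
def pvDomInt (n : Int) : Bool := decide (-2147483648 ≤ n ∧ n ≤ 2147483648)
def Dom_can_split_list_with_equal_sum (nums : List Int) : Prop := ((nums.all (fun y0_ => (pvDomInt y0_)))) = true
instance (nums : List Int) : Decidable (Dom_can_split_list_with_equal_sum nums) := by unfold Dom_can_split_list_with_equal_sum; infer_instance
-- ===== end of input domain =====

-- B replaces A's exponential three-way recursion by a one-pass set of reachable subset sums (a different algorithm of the same worst-case cost).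

-- ===== PORT A =====
-- recursive helper can_partition(index, current_sum, subset_count); nums[index] is in range
-- whenever read (guarded by `index >= len(nums)`), so getD is exact here.
def pvCanPartition (nums : List Int) (target : Int) (index : Nat) (current : Int) (cnt : Nat) : Bool :=
  if cnt > 1 then false
  else if current == target && cnt == 1 then true
  else if _h : nums.length ≤ index then false
  else
    pvCanPartition nums target (index + 1) (current + nums.getD index 0) cnt ||
    (pvCanPartition nums target (index + 1) current (cnt + 1) ||
     pvCanPartition nums target (index + 1) current cnt)
termination_by nums.length - index

def can_split_list_with_equal_sum (nums : List Int) : Bool :=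
  -- `if not nums or len(nums) < 2: return False`
  if nums.length < 2 then false
  else
    let total := nums.sum
    if PySem.Int.mod total 2 != 0 then false
    else pvCanPartition nums (PySem.Int.floordiv total 2) 0 0 0

-- ===== PORT B =====
-- seen = {0}; for x in nums: seen |= {s + x for s in seen}
def pvReach (nums : List Int) : PySem.Set Int :=
  nums.foldl (fun seen x => PySem.Set.union seen (seen.map (fun s => s + x))) (PySem.Set.ofList [0])

def can_split_list_with_equal_sum_alt (nums : List Int) : Bool :=
  if nums.length < 2 then false
  else
    let total := nums.sum
    if PySem.Int.mod total 2 != 0 then false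
    else PySem.Set.contains (pvReach nums) (PySem.Int.floordiv total 2)

-- ===== PRECONDITION & SPEC =====
def Spec_can_split_list_with_equal_sum (nums : List Int) (out : Bool) : Prop := out = can_split_list_with_equal_sum_alt nums
instance (nums : List Int) (out : Bool) : Decidable (Spec_can_split_list_with_equal_sum nums out) := by unfold Spec_can_split_list_with_equal_sum; infer_instance

-- ===== CLAIM (what is proved, stated in full; the proofs are below) =====
def Claim_equal_can_split_list_with_equal_sum : Prop := ∀ (nums : List Int), Dom_can_split_list_with_equal_sum nums → Spec_can_split_list_with_equal_sum nums (can_split_list_with_equal_sum nums)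

-- ===== LEMMAS AND PROOFS =====

-- sums of all sublists of l (with multiplicity)
def pvSums : List Int → List Int
  | [] => [0]
  | a :: xs => pvSums xs ++ (pvSums xs).map (fun s => a + s)

-- sums of all PROPER sublists of l (missing at least one position)
def pvPSums : List Int → List Int
  | [] => []
  | a :: xs => (pvPSums xs).map (fun s => a + s) ++ pvSums xs ++ pvPSums xs

theorem zero_mem_pvSums (l : List Int) : (0 : Int) ∈ pvSums l := by
  induction l with
  | nil => simp [pvSums]
  | cons a xs ih => simp only [pvSums, List.mem_append]; exact Or.inl ih

theorem pvCanPartition_two (nums : List Int) (target : Int) (index : Nat) (current : Int) :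
    pvCanPartition nums target index current 2 = false := by
  unfold pvCanPartition; simp

theorem pvCanPartition_one_hit (nums : List Int) (target : Int) (index : Nat) :
    pvCanPartition nums target index target 1 = true := by
  unfold pvCanPartition; simp

theorem pvCanPartition_one (nums : List Int) (target : Int) :
    ∀ (k index : Nat), nums.length - index ≤ k → ∀ current,
      (pvCanPartition nums target index current 1 = true ↔
        ∃ s ∈ pvSums (nums.drop index), current + s = target) := by
  intro k
  induction k with
  | zero =>
    intro index hk current
    have hlen : nums.length ≤ index := by omega
    unfold pvCanPartition
    simp [List.drop_eq_nil_of_le hlen, hlen, pvSums]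
  | succ k ih =>
    intro index hk current
    by_cases hlen : nums.length ≤ index
    · unfold pvCanPartition
      simp [List.drop_eq_nil_of_le hlen, hlen, pvSums]
    · have hlt : index < nums.length := by omega
      have hdrop : nums.drop index = nums[index] :: nums.drop (index + 1) :=
        List.drop_eq_getElem_cons hlt
      have hget : nums[index]?.getD 0 = nums[index] := by
        rw [List.getElem?_eq_getElem hlt]; rfl
      by_cases hc : current = target
      · rw [hc, pvCanPartition_one_hit, hdrop]
        simp only [true_iff]
        refine ⟨0, ?_, by omega⟩
        simp only [pvSums, List.mem_append]
        exact Or.inl (zero_mem_pvSums _)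
      · unfold pvCanPartition
        rw [hdrop]
        simp [hlen, hc, hget, pvCanPartition_two, ih (index + 1) (by omega),
          pvSums, List.mem_append, List.mem_map]
        constructor
        · rintro (⟨s, hs, he⟩ | ⟨s, hs, he⟩)
          · exact ⟨nums[index] + s, Or.inr ⟨s, hs, rfl⟩, by omega⟩
          · exact ⟨s, Or.inl hs, he⟩
        · rintro ⟨s, hs | ⟨b, hb, rfl⟩, he⟩
          · exact Or.inr ⟨s, hs, he⟩
          · exact Or.inl ⟨b, hb, by omega⟩

theorem pvCanPartition_zero (nums : List Int) (target : Int) :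
    ∀ (k index : Nat), nums.length - index ≤ k → ∀ current,
      (pvCanPartition nums target index current 0 = true ↔
        ∃ s ∈ pvPSums (nums.drop index), current + s = target) := by
  intro k
  induction k with
  | zero =>
    intro index hk current
    have hlen : nums.length ≤ index := by omega
    unfold pvCanPartition
    simp [List.drop_eq_nil_of_le hlen, hlen, pvPSums]
  | succ k ih =>
    intro index hk current
    by_cases hlen : nums.length ≤ index
    · unfold pvCanPartition
      simp [List.drop_eq_nil_of_le hlen, hlen, pvPSums]
    · have hlt : index < nums.length := by omega
      have hdrop : nums.drop index = nums[index] :: nums.drop (index + 1) :=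
        List.drop_eq_getElem_cons hlt
      have hget : nums[index]?.getD 0 = nums[index] := by
        rw [List.getElem?_eq_getElem hlt]; rfl
      unfold pvCanPartition
      rw [hdrop]
      simp [hlen, hget, ih (index + 1) (by omega),
        pvCanPartition_one nums target (nums.length - (index + 1)) (index + 1) le_rfl,
        pvPSums, List.mem_append, List.mem_map]
      constructor
      · rintro (⟨s, hs, he⟩ | (⟨s, hs, he⟩ | ⟨s, hs, he⟩))
        · exact ⟨nums[index] + s, Or.inl ⟨s, hs, rfl⟩, by omega⟩
        · exact ⟨s, Or.inr (Or.inl hs), he⟩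
        · exact ⟨s, Or.inr (Or.inr hs), he⟩
      · rintro ⟨s, ⟨b, hb, rfl⟩ | (hs | hs), he⟩
        · exact Or.inl ⟨b, hb, by omega⟩
        · exact Or.inr (Or.inl ⟨s, hs, he⟩)
        · exact Or.inr (Or.inr ⟨s, hs, he⟩)

theorem mem_pvSums (l : List Int) (y : Int) :
    y ∈ pvSums l ↔ ∃ t : List Int, t.Sublist l ∧ t.sum = y := by
  induction l generalizing y with
  | nil =>
    simp only [pvSums, List.mem_singleton]
    constructor
    · rintro rfl; exact ⟨[], List.nil_sublist _, rfl⟩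
    · rintro ⟨t, ht, rfl⟩; rw [List.sublist_nil.mp ht]; rfl
  | cons a xs ih =>
    simp only [pvSums, List.mem_append, List.mem_map, ih]
    constructor
    · rintro (⟨t, ht, rfl⟩ | ⟨s, ⟨t, ht, rfl⟩, rfl⟩)
      · exact ⟨t, ht.cons a, rfl⟩
      · exact ⟨a :: t, ht.cons₂ a, by simp⟩
    · rintro ⟨t, ht, rfl⟩
      rcases List.sublist_cons_iff.mp ht with h | ⟨t', rfl, h⟩
      · exact Or.inl ⟨t, h, rfl⟩
      · exact Or.inr ⟨t'.sum, ⟨t', h, rfl⟩, by simp⟩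

theorem mem_pvPSums (l : List Int) (y : Int) :
    y ∈ pvPSums l ↔ ∃ t : List Int, t.Sublist l ∧ t.length < l.length ∧ t.sum = y := by
  induction l generalizing y with
  | nil =>
    simp only [pvPSums, List.not_mem_nil, false_iff]
    rintro ⟨t, ht, hl, -⟩
    rw [List.sublist_nil.mp ht] at hl
    simp at hl
  | cons a xs ih =>
    simp only [pvPSums, List.mem_append, List.mem_map, ih, mem_pvSums]
    constructor
    · rintro ((⟨s, ⟨t, ht, hl, rfl⟩, rfl⟩ | ⟨t, ht, rfl⟩) | ⟨t, ht, hl, rfl⟩)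
      · exact ⟨a :: t, ht.cons₂ a, by simpa using hl, by simp⟩
      · refine ⟨t, ht.cons a, ?_, rfl⟩
        have := ht.length_le; simp; omega
      · exact ⟨t, ht.cons a, Nat.lt_succ_of_lt hl, rfl⟩
    · rintro ⟨t, ht, hl, rfl⟩
      rcases List.sublist_cons_iff.mp ht with h | ⟨t', rfl, h⟩
      · exact Or.inl (Or.inr ⟨t, h, rfl⟩)
      · exact Or.inl (Or.inl ⟨t'.sum, ⟨t', h, by simpa using hl, rfl⟩, by simp⟩)

theorem mem_pvReach_aux (l : List Int) :
    ∀ (S : List Int) (y : Int),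
      (y ∈ l.foldl (fun seen x => PySem.Set.union seen (seen.map (fun s => s + x))) S) ↔
        ∃ s0 ∈ S, ∃ t : List Int, t.Sublist l ∧ y = s0 + t.sum := by
  induction l with
  | nil =>
    intro S y
    simp only [List.foldl_nil]
    constructor
    · intro h; exact ⟨y, h, [], List.nil_sublist _, by simp⟩
    · rintro ⟨s0, hs0, t, ht, rfl⟩
      rw [List.sublist_nil.mp ht]; simpa using hs0
  | cons a xs ih =>
    intro S y
    simp only [List.foldl_cons, ih]
    constructor
    · rintro ⟨s0, hs0, t, ht, rfl⟩
      rcases (PySem.Set.mem_union _ _ _).mp hs0 with h | h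
      · exact ⟨s0, h, t, ht.cons a, rfl⟩
      · rcases List.mem_map.mp h with ⟨s1, hs1, rfl⟩
        refine ⟨s1, hs1, a :: t, ht.cons₂ a, ?_⟩
        simp; ring
    · rintro ⟨s0, hs0, t, ht, rfl⟩
      rcases List.sublist_cons_iff.mp ht with h | ⟨t', rfl, h⟩
      · exact ⟨s0, (PySem.Set.mem_union _ _ _).mpr (Or.inl hs0), t, h, rfl⟩
      · refine ⟨s0 + a, (PySem.Set.mem_union _ _ _).mpr (Or.inr (List.mem_map.mpr ⟨s0, hs0, rfl⟩)),
          t', h, ?_⟩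
        simp; ring

theorem mem_pvReach (nums : List Int) (y : Int) :
    y ∈ pvReach nums ↔ y ∈ pvSums nums := by
  rw [pvReach, mem_pvReach_aux, mem_pvSums]
  constructor
  · rintro ⟨s0, hs0, t, ht, rfl⟩
    have h0 : s0 = 0 := by simpa using (PySem.Set.mem_ofList _ _).mp hs0
    exact ⟨t, ht, by omega⟩
  · rintro ⟨t, ht, rfl⟩
    exact ⟨0, (PySem.Set.mem_ofList _ _).mpr (by simp), t, ht, by omega⟩

-- ===== VERDICT (by name: the statement is the Claim_ definition above) =====
theorem can_split_list_with_equal_sum_spec : Claim_equal_can_split_list_with_equal_sum := by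
  intro nums _
  unfold Spec_can_split_list_with_equal_sum can_split_list_with_equal_sum
    can_split_list_with_equal_sum_alt
  by_cases hlen : nums.length < 2
  · simp [hlen]
  · simp only [hlen, if_false]
    by_cases hmod : PySem.Int.mod nums.sum 2 = 0
    · simp only [hmod, bne_self_eq_false, Bool.false_eq_true, if_false]
      set target := PySem.Int.floordiv nums.sum 2 with htarget
      have htot2 : nums.sum = 2 * target := by
        have h1 := PySem.Int.floordiv_mul_add_mod nums.sum 2
        rw [hmod] at h1; omega
      rw [Bool.eq_iff_iff,
        pvCanPartition_zero nums target nums.length 0 (by omega),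
        PySem.Set.contains_iff, mem_pvReach, List.drop_zero]
      constructor
      · rintro ⟨s, hs, he⟩
        rcases (mem_pvPSums nums s).mp hs with ⟨t, ht, -, rfl⟩
        exact (mem_pvSums nums target).mpr ⟨t, ht, by omega⟩
      · intro h
        rcases (mem_pvSums nums target).mp h with ⟨t, ht, hsum⟩
        by_cases hl : t.length < nums.length
        · exact ⟨target, (mem_pvPSums nums target).mpr ⟨t, ht, hl, hsum⟩, by omega⟩
        · have hteq : t = nums := ht.eq_of_length (by have := ht.length_le; omega)
          have h0 : target = 0 := by rw [hteq] at hsum; omega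
          exact ⟨target, (mem_pvPSums nums target).mpr
            ⟨[], List.nil_sublist _, by simp; omega, by simp [h0]⟩, by omega⟩
    · have hm1 : PySem.Int.mod nums.sum 2 = 1 := by
        have h1 := PySem.Int.mod_nonneg nums.sum (by omega : (0:Int) < 2)
        have h2 := PySem.Int.mod_lt nums.sum (by omega : (0:Int) < 2)
        omega
      have h3 : nums.sum % 2 = 1 := by
        rwa [PySem.Int.mod_eq_emod_of_pos (by omega : (0:Int) < 2)] at hm1
      simp [h3]
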